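-- pv_equiv track=rewrite | github.com/WallerTsai/OJ-Solution | leetcode-py/动态规划/深度搜索/No3720.py | lexGreaterPermutation
-- ===== SOURCE A (Python) =====
-- def lexGreaterPermutation(s: str, target: str) -> str:
--     if ''.join(sorted(s, reverse=True)) <= target:
--         return ""
--
--     n = len(s)
--     cnt = [0] * 26
--     for ch in s:
--         cnt[ord(ch) - ord('a')] += 1
--
--     res =  []
--
--     def can_fill(ch: str):
--         temp = res + [chr(ch + ord('a'))]
--         remaining = []
--         for d in range(25, -1, -1):
--             remaining.extend([chr(d + ord('a'))] * cnt[d])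
--         temp.extend(remaining)
--         return ''.join(temp) > target
--
--     for _ in range(n):
--         for ch_idx in range(26):
--             if cnt[ch_idx] == 0:
--                 continue
--             cnt[ch_idx] -= 1
--             if can_fill(ch_idx):
--                 res.append(chr(ch_idx + ord('a')))
--                 break
--             cnt[ch_idx] += 1
--
--     return ''.join(res)
-- ===== SOURCE B (Python) =====
-- def lexGreaterPermutation(s: str, target: str) -> str:
--     # Quick rejection: the largest permutation must already beat target.
--     if ''.join(sorted(s, reverse=True)) <= target:
--         return ""
--
--     cnt = [0] * 26
--     for ch in s:
--         cnt[ord(ch) - ord('a')] += 1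
--
--     n, m = len(s), len(target)
--     res = []
--     i = 0
--     while i < n:
--         if i >= m:
--             break  # target already a strict prefix of the result: fill ascending
--         v = target[i]
--         vi = ord(v) - ord('a')
--         took = False
--         if 0 <= vi < 26 and cnt[vi] > 0:
--             cnt[vi] -= 1
--             rest_desc = ''.join(chr(97 + d) * cnt[d] for d in range(25, -1, -1))
--             if rest_desc > target[i + 1:]:
--                 res.append(v)
--                 i += 1
--                 took = True
--             else:
--                 cnt[vi] += 1
--         if not took:
--             # place the smallest remaining letter strictly above target[i]
--             for j in range(26):
--                 if cnt[j] > 0 and chr(97 + j) > v: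
--                     cnt[j] -= 1
--                     res.append(chr(97 + j))
--                     break
--             else:
--                 return ""
--             break
--     return ''.join(res) + ''.join(chr(97 + d) * cnt[d] for d in range(26))
-- ===== Notes on version B (the rewrite author's own statement) =====
-- stated objective: faster
-- what changed: A re-runs a 26-way candidate scan at every one of n positions, each candidate rebuilding and re-comparing a full candidate string against target; B instead walks target once, keeping the matched prefix implicit, compares only the descending remainder with the target suffix to decide whether the tie can continue, and the moment the prefix goes strictly above target appends the remaining letters in ascending order and stops.
import Mathlib
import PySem

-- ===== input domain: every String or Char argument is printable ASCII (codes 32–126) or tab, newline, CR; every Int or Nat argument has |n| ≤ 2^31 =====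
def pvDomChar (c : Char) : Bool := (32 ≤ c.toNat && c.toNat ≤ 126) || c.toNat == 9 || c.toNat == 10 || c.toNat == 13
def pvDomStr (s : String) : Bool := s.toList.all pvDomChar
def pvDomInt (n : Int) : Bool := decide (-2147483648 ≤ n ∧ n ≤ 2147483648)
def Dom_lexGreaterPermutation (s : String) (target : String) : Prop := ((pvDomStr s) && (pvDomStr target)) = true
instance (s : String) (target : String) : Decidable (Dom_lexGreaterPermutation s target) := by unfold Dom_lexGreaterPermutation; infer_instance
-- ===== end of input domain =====

-- B replaces A's per-position scan that rebuilds and re-compares a full candidate string for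
-- each of 26 letters (Θ(26·n) work per position) by a single walk along target that keeps the
-- tied prefix implicit, compares only the descending remainder against the target suffix, and
-- appends the remaining letters in ascending order as soon as the prefix goes strictly above
-- target (objective: faster).

-- ===== PORT A =====
-- Python's '<' on strings: lexicographic by code point, a proper prefix is smaller (shared primitive)
def pyLt : List Char → List Char → Bool
  | [], [] => false
  | [], _ :: _ => true
  | _ :: _, [] => false
  | a :: as, b :: bs => if a = b then pyLt as bs else decide (a < b)

def pyGt (a b : List Char) : Bool := pyLt b a
def pyLe (a b : List Char) : Bool := !pyLt b a

-- cnt[i] += 1 with Python list-index semantics (a negative index wraps once; out of range would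
-- raise IndexError in Python — those inputs are excluded by Pre_, here the list is left unchanged)
def bumpAt (l : List Int) (i : Int) : List Int :=
  let j : Int := if i < 0 then i + l.length else i
  if 0 ≤ j ∧ j < l.length then l.set j.toNat (l.getD j.toNat 0 + 1) else l

-- cnt = [0]*26; for ch in s: cnt[ord(ch) - ord('a')] += 1   (identical code in A and in B)
def countChar (sl : List Char) : List Int :=
  sl.foldl (fun cnt ch => bumpAt cnt ((ch.toNat : Int) - 97)) (List.replicate 26 0)

-- cnt[d] -= 1 (d always in range 0..25 where used)
def decAt (cnt : List Int) (d : Nat) : List Int := cnt.set d (cnt.getD d 0 - 1)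

-- [chr(d+97)] * cnt[d]
def repC (cnt : List Int) (d : Nat) : List Char :=
  List.replicate (cnt.getD d 0).toNat (Char.ofNat (97 + d))

-- for d in range(25,-1,-1): remaining.extend([chr(d+97)]*cnt[d])
def descFill (cnt : List Int) : List Char :=
  (List.range 26).reverse.foldl (fun acc d => acc ++ repC cnt d) []

-- ascending counterpart (used by B): ''.join(chr(97+d)*cnt[d] for d in range(26))
def ascFill (cnt : List Int) : List Char :=
  (List.range 26).foldl (fun acc d => acc ++ repC cnt d) []

-- can_fill, called (as in A) after cnt was already decremented at c
def canFill (res : List Char) (cnt : List Int) (c : Nat) (tl : List Char) : Bool :=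
  pyGt (res ++ Char.ofNat (97 + c) :: descFill cnt) tl

-- the inner 'for ch_idx in range(26): …' of A, with its continue/break structure
def innerScan (tl : List Char) : List Nat → (List Int × List Char) → (List Int × List Char)
  | [], st => st
  | d :: ds, (cnt, res) =>
    if cnt.getD d 0 = 0 then innerScan tl ds (cnt, res)
    else
      let cnt' := decAt cnt d
      if canFill res cnt' d tl then (cnt', res ++ [Char.ofNat (97 + d)])
      else innerScan tl ds (cnt, res)

-- the outer 'for _ in range(n)' of A over the mutable state (cnt, res)
def aLoop (tl : List Char) : Nat → (List Int × List Char) → (List Int × List Char)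
  | 0, st => st
  | n + 1, st => aLoop tl n (innerScan tl (List.range 26) st)

def lexGreaterPermutation (s : String) (target : String) : String :=
  let sl := s.toList
  let tl := target.toList
  if pyLe (PySem.List.sorted sl (fun x => x) true) tl then "" else
  String.ofList (aLoop tl sl.length (countChar sl, [])).2

-- ===== PORT B =====
-- for j in range(26): if cnt[j] > 0 and chr(97+j) > v: …  (first such j)
def findGreater (cnt : List Int) (v : Char) : Option Nat :=
  (List.range 26).find? (fun j => decide (0 < cnt.getD j 0) && decide (v < Char.ofNat (97 + j)))

-- B's 'while i < n' walk along target; the fuel is n - i; none = the 'return ""' dead end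
def bLoop : Nat → List Int → List Char → Option (List Char)
  | 0, cnt, _ => some (ascFill cnt)
  | _ + 1, cnt, [] => some (ascFill cnt)
  | n + 1, cnt, v :: u' =>
    if (decide (97 ≤ v.toNat) && decide (v.toNat ≤ 122) && decide (0 < cnt.getD (v.toNat - 97) 0))
        && pyGt (descFill (decAt cnt (v.toNat - 97))) u' then
      (bLoop n (decAt cnt (v.toNat - 97)) u').map (fun r => v :: r)
    else
      match findGreater cnt v with
      | some j => some (Char.ofNat (97 + j) :: ascFill (decAt cnt j))
      | none => none

def lexGreaterPermutation_alt (s : String) (target : String) : String :=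
  let sl := s.toList
  let tl := target.toList
  if pyLe (PySem.List.sorted sl (fun x => x) true) tl then "" else
  match bLoop sl.length (countChar sl) tl with
  | some r => String.ofList r
  | none => ""

-- ===== PRECONDITION & SPEC =====
-- Pre_ admits exactly the inputs on which Python A returns: a character of s with code above 122
-- or below 71 makes cnt[ord(ch)-97] raise IndexError in A (and in B, which counts the same way) —
-- unless the initial guard already answers "" because the largest rearrangement of s is ≤ target,
-- in which case the counting loop is never reached.
def Pre_lexGreaterPermutation (s : String) (target : String) : Prop :=
  (s.toList.all (fun c => 71 ≤ c.toNat && c.toNat ≤ 122)) = true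
  ∨ pyLe (PySem.List.sorted s.toList (fun x => x) true) target.toList = true

instance (s : String) (target : String) : Decidable (Pre_lexGreaterPermutation s target) := by
  unfold Pre_lexGreaterPermutation; infer_instance

def pvWitness_lexGreaterPermutation : String × String := ("ba", "ab")

def Spec_lexGreaterPermutation (s : String) (target : String) (out : String) : Prop :=
  out = lexGreaterPermutation_alt s target
instance (s : String) (target : String) (out : String) : Decidable (Spec_lexGreaterPermutation s target out) := by
  unfold Spec_lexGreaterPermutation; infer_instance

-- ===== CLAIM (what is proved, stated in full; the proofs are below) =====
def Claim_equal_lexGreaterPermutation : Prop :=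
  ∀ (s : String) (target : String), Dom_lexGreaterPermutation s target →
    Pre_lexGreaterPermutation s target →
    Spec_lexGreaterPermutation s target (lexGreaterPermutation s target)

-- ===== LEMMAS AND PROOFS =====

-- total number of letters still available
def totalCnt (cnt : List Int) : Nat := (cnt.map Int.toNat).sum

def Valid (cnt : List Int) : Prop := cnt.length = 26 ∧ ∀ x ∈ cnt, 0 ≤ x


-- ---- pyLt / pyGt basics ----

theorem pyLt_append (p x y : List Char) : pyLt (p ++ x) (p ++ y) = pyLt x y := by
  induction p with
  | nil => rfl
  | cons a as ih => simp [pyLt, ih]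

theorem pyGt_append (p x y : List Char) : pyGt (p ++ x) (p ++ y) = pyGt x y := by
  simp [pyGt, pyLt_append]

theorem pyGt_cons (a b : Char) (x y : List Char) :
    pyGt (a :: x) (b :: y) = if b = a then pyGt x y else decide (b < a) := rfl

theorem pyGt_nil (y : List Char) : pyGt [] y = false := by
  cases y <;> rfl

theorem pyLt_self_append (p x : List Char) (hx : x ≠ []) : pyLt p (p ++ x) = true := by
  induction p with
  | nil => cases x with | nil => exact absurd rfl hx | cons c cs => rfl
  | cons a as ih => simpa [pyLt] using ih

-- free state: any non-empty continuation of the prefix p beats tl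
def FreeSt (p tl : List Char) : Prop := ∀ x, x ≠ [] → pyGt (p ++ x) tl = true

theorem freeSt_extend (p tl : List Char) (c : Char) (h : FreeSt p tl) :
    FreeSt (p ++ [c]) tl := by
  intro x hx
  have := h (c :: x) (by simp)
  simpa using this

theorem freeSt_self (p : List Char) : FreeSt p p := by
  intro x hx
  have : pyLt p (p ++ x) = true := pyLt_self_append p x hx
  simpa [pyGt] using this

-- ---- fills as flatten of maps ----

theorem descFill_eq (cnt : List Int) :
    descFill cnt = ((List.range 26).reverse.map (repC cnt)).flatten := by
  simp [descFill]

theorem ascFill_eq (cnt : List Int) :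
    ascFill cnt = ((List.range 26).map (repC cnt)).flatten := by
  simp [ascFill]

-- ---- repC / decAt pointwise facts ----

theorem getD_decAt_self (cnt : List Int) (d : Nat) (h : 0 < cnt.getD d 0) :
    (decAt cnt d).getD d 0 = cnt.getD d 0 - 1 := by
  have hd : d < cnt.length := by
    by_contra hge
    have : cnt.getD d 0 = 0 := by
      simp [List.getD, List.getElem?_eq_none (by omega : cnt.length ≤ d)]
    omega
  simp [decAt, List.getD, hd]

theorem getD_decAt_ne (cnt : List Int) (d e : Nat) (h : e ≠ d) :
    (decAt cnt d).getD e 0 = cnt.getD e 0 := by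
  simp [decAt, List.getD, List.getElem?_set_ne (fun hh => h hh.symm)]

theorem repC_decAt_ne (cnt : List Int) (d e : Nat) (h : e ≠ d) :
    repC (decAt cnt d) e = repC cnt e := by
  unfold repC
  rw [getD_decAt_ne cnt d e h]

theorem repC_decAt_self (cnt : List Int) (d : Nat) (h : 0 < cnt.getD d 0) :
    repC cnt d = Char.ofNat (97 + d) :: repC (decAt cnt d) d := by
  have h1 : (decAt cnt d).getD d 0 = cnt.getD d 0 - 1 := getD_decAt_self cnt d h
  have h2 : (cnt.getD d 0).toNat = (cnt.getD d 0 - 1).toNat + 1 := by omega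
  unfold repC
  rw [h1, h2, List.replicate_succ]

theorem repC_nil (cnt : List Int) (d : Nat) (h : cnt.getD d 0 ≤ 0) : repC cnt d = [] := by
  unfold repC
  rw [Int.toNat_of_nonpos h, List.replicate_zero]

-- ---- generic head decomposition of a fill ----

theorem fill_head_gen (cnt : List Int) (c : Nat) (L1 L2 : List Nat)
    (h1 : ∀ d ∈ L1, cnt.getD d 0 ≤ 0) (hc : 0 < cnt.getD c 0)
    (hn1 : c ∉ L1) (hn2 : c ∉ L2) :
    ((L1 ++ c :: L2).map (repC cnt)).flatten
      = Char.ofNat (97 + c) :: ((L1 ++ c :: L2).map (repC (decAt cnt c))).flatten := by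
  have e1 : ∀ d ∈ L1, repC cnt d = [] := fun d hd => repC_nil cnt d (h1 d hd)
  have e1' : ∀ d ∈ L1, repC (decAt cnt c) d = [] := by
    intro d hd
    rw [repC_decAt_ne cnt c d (fun hh => hn1 (hh ▸ hd))]
    exact e1 d hd
  have e2 : ∀ d ∈ L2, repC (decAt cnt c) d = repC cnt d := by
    intro d hd
    exact repC_decAt_ne cnt c d (fun hh => hn2 (hh ▸ hd))
  have fl1 : (L1.map (repC cnt)).flatten = [] := by
    apply List.flatten_eq_nil_iff.mpr
    intro l hl
    obtain ⟨d, hd, rfl⟩ := List.mem_map.mp hl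
    exact e1 d hd
  have fl1' : (L1.map (repC (decAt cnt c))).flatten = [] := by
    apply List.flatten_eq_nil_iff.mpr
    intro l hl
    obtain ⟨d, hd, rfl⟩ := List.mem_map.mp hl
    exact e1' d hd
  have fl2 : (L2.map (repC (decAt cnt c))).flatten = (L2.map (repC cnt)).flatten := by
    congr 1
    exact List.map_congr_left e2
  simp only [List.map_append, List.map_cons, List.flatten_append, List.flatten_cons,
    fl1, fl1', fl2, List.nil_append]
  rw [repC_decAt_self cnt c hc]
  simp

theorem fill_nil_of_nonpos (cnt : List Int) (L : List Nat)
    (h : ∀ d, cnt.getD d 0 ≤ 0) :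
    (L.map (repC cnt)).flatten = [] := by
  apply List.flatten_eq_nil_iff.mpr
  intro l hl
  obtain ⟨d, hd, rfl⟩ := List.mem_map.mp hl
  exact repC_nil cnt d (h d)


-- ---- character code facts ----

theorem charLt_iff (a b : Char) : a < b ↔ a.toNat < b.toNat := by
  rw [Char.lt_def, UInt32.lt_iff_toNat_lt]; rfl

theorem charEq_of_toNat (a b : Char) (h : a.toNat = b.toNat) : a = b :=
  Char.ext (UInt32.toNat_inj.mp h)

theorem toNat_ofNat_small (n : Nat) (h : n < 55296) : (Char.ofNat n).toNat = n := by
  rw [Char.toNat_ofNat, if_pos (Or.inl h)]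

-- ---- totals and validity ----

theorem totalCnt_cons (a : Int) (l : List Int) : totalCnt (a :: l) = a.toNat + totalCnt l := by
  simp [totalCnt]

theorem getD_cons_succ (a : Int) (l : List Int) (k : Nat) :
    (a :: l).getD (k + 1) 0 = l.getD k 0 := by
  simp [List.getD]

theorem getD_zero_of_ge (l : List Int) (k : Nat) (h : l.length ≤ k) : l.getD k 0 = 0 := by
  simp [List.getD, List.getElem?_eq_none h]

theorem lt_length_of_getD_pos (l : List Int) (k : Nat) (h : 0 < l.getD k 0) : k < l.length := by
  by_contra hge
  rw [getD_zero_of_ge l k (by omega)] at h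
  omega

theorem totalCnt_set (l : List Int) :
    ∀ (k : Nat) (x : Int), k < l.length →
      totalCnt (l.set k x) + (l.getD k 0).toNat = totalCnt l + x.toNat := by
  induction l with
  | nil => intro k x hk; simp at hk
  | cons a as ih =>
    intro k x hk
    cases k with
    | zero => simp [totalCnt_cons, List.getD]; omega
    | succ k =>
      have := ih k x (by simpa using hk)
      simp only [List.set_cons_succ, totalCnt_cons, getD_cons_succ]
      omega

theorem totalCnt_decAt (cnt : List Int) (d : Nat) (h : 0 < cnt.getD d 0) :
    totalCnt (decAt cnt d) + 1 = totalCnt cnt := by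
  have hd : d < cnt.length := lt_length_of_getD_pos cnt d h
  have := totalCnt_set cnt d (cnt.getD d 0 - 1) hd
  unfold decAt
  omega

theorem totalCnt_pos_exists (cnt : List Int) (h : 0 < totalCnt cnt) :
    ∃ d, 0 < cnt.getD d 0 := by
  induction cnt with
  | nil => simp [totalCnt] at h
  | cons a as ih =>
    rw [totalCnt_cons] at h
    by_cases ha : 0 < a
    · exact ⟨0, by simpa [List.getD] using ha⟩
    · obtain ⟨d, hd⟩ := ih (by omega)
      exact ⟨d + 1, by simpa [getD_cons_succ] using hd⟩

theorem totalCnt_zero_all (cnt : List Int) (h : totalCnt cnt = 0) :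
    ∀ d, cnt.getD d 0 ≤ 0 := by
  induction cnt with
  | nil => intro d; simp [List.getD]
  | cons a as ih =>
    rw [totalCnt_cons] at h
    intro d
    cases d with
    | zero => simp [List.getD]; omega
    | succ d => rw [getD_cons_succ]; exact ih (by omega) d

theorem ascFill_nil (cnt : List Int) (h : totalCnt cnt = 0) : ascFill cnt = [] := by
  rw [ascFill_eq]
  exact fill_nil_of_nonpos cnt _ (totalCnt_zero_all cnt h)

theorem descFill_nil (cnt : List Int) (h : totalCnt cnt = 0) : descFill cnt = [] := by
  rw [descFill_eq]
  exact fill_nil_of_nonpos cnt _ (totalCnt_zero_all cnt h)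

theorem valid_decAt (cnt : List Int) (d : Nat) (hv : Valid cnt) (h : 0 < cnt.getD d 0) :
    Valid (decAt cnt d) := by
  refine ⟨by simpa [decAt] using hv.1, ?_⟩
  intro x hx
  rcases List.mem_or_eq_of_mem_set hx with hmem | rfl
  · exact hv.2 x hmem
  · omega

theorem getD_nonneg (cnt : List Int) (hv : Valid cnt) (d : Nat) : 0 ≤ cnt.getD d 0 := by
  by_cases hd : d < cnt.length
  · have : cnt.getD d 0 = cnt[d] := List.getD_eq_getElem cnt 0 hd
    rw [this]
    exact hv.2 _ (List.getElem_mem hd)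
  · rw [getD_zero_of_ge cnt d (by omega)]

theorem bumpAt_valid_total (cnt : List Int) (i : Int) (hv : Valid cnt)
    (hi : -26 ≤ i) (hi2 : i < 26) :
    Valid (bumpAt cnt i) ∧ totalCnt (bumpAt cnt i) = totalCnt cnt + 1 := by
  have hlen := hv.1
  unfold bumpAt
  set j : Int := if i < 0 then i + cnt.length else i with hj
  have hj0 : 0 ≤ j ∧ j < cnt.length := by
    rw [hj, hlen]
    split <;> omega
  rw [if_pos hj0]
  have hjn : j.toNat < cnt.length := by omega
  have hnn := getD_nonneg cnt hv j.toNat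
  constructor
  · refine ⟨by simpa using hlen, ?_⟩
    intro x hx
    rcases List.mem_or_eq_of_mem_set hx with hmem | rfl
    · exact hv.2 x hmem
    · omega
  · have := totalCnt_set cnt j.toNat (cnt.getD j.toNat 0 + 1) hjn
    omega

theorem countChar_aux (sl : List Char) :
    ∀ cnt, Valid cnt → (∀ c ∈ sl, 71 ≤ c.toNat ∧ c.toNat ≤ 122) →
      Valid (sl.foldl (fun cnt ch => bumpAt cnt ((ch.toNat : Int) - 97)) cnt)
      ∧ totalCnt (sl.foldl (fun cnt ch => bumpAt cnt ((ch.toNat : Int) - 97)) cnt)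
          = totalCnt cnt + sl.length := by
  induction sl with
  | nil => intro cnt hv _; simpa using hv
  | cons c cs ih =>
    intro cnt hv hall
    have hc := hall c (by simp)
    have hb := bumpAt_valid_total cnt ((c.toNat : Int) - 97) hv (by omega) (by omega)
    have := ih (bumpAt cnt ((c.toNat : Int) - 97)) hb.1 (fun d hd => hall d (by simp [hd]))
    refine ⟨this.1, ?_⟩
    rw [List.foldl_cons]
    rw [this.2, hb.2]
    simp
    omega

theorem valid_replicate : Valid (List.replicate 26 (0 : Int)) := by
  constructor
  · simp
  · intro x hx
    have := List.eq_of_mem_replicate hx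
    omega

theorem countChar_valid (sl : List Char) (h : ∀ c ∈ sl, 71 ≤ c.toNat ∧ c.toNat ≤ 122) :
    Valid (countChar sl) :=
  (countChar_aux sl _ valid_replicate h).1

theorem countChar_total (sl : List Char) (h : ∀ c ∈ sl, 71 ≤ c.toNat ∧ c.toNat ≤ 122) :
    totalCnt (countChar sl) = sl.length := by
  have := (countChar_aux sl _ valid_replicate h).2
  have hz : totalCnt (List.replicate 26 (0 : Int)) = 0 := by decide
  unfold countChar
  omega


-- ---- head decomposition of the fills along a split of the index list ----

theorem nodup_split {c : Nat} {L1 L2 L : List Nat} (hnd : L.Nodup) (hL : L = L1 ++ c :: L2) :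
    c ∉ L1 ∧ c ∉ L2 := by
  subst hL
  constructor
  · intro hc
    exact (List.disjoint_of_nodup_append hnd) hc (by simp)
  · exact (List.nodup_cons.mp (List.Nodup.of_append_right hnd)).1

theorem ascFill_head (cnt : List Int) (L1 L2 : List Nat) (c : Nat)
    (hL : List.range 26 = L1 ++ c :: L2)
    (h1 : ∀ d ∈ L1, cnt.getD d 0 ≤ 0) (hc : 0 < cnt.getD c 0) :
    ascFill cnt = Char.ofNat (97 + c) :: ascFill (decAt cnt c) := by
  obtain ⟨hn1, hn2⟩ := nodup_split (List.nodup_range) hL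
  rw [ascFill_eq, ascFill_eq, hL]
  exact fill_head_gen cnt c L1 L2 h1 hc hn1 hn2

theorem descFill_head (cnt : List Int) (L1 L2 : List Nat) (c : Nat)
    (hL : (List.range 26).reverse = L1 ++ c :: L2)
    (h1 : ∀ d ∈ L1, cnt.getD d 0 ≤ 0) (hc : 0 < cnt.getD c 0) :
    descFill cnt = Char.ofNat (97 + c) :: descFill (decAt cnt c) := by
  obtain ⟨hn1, hn2⟩ := nodup_split (List.nodup_reverse.mpr List.nodup_range) hL
  rw [descFill_eq, descFill_eq, hL]
  exact fill_head_gen cnt c L1 L2 h1 hc hn1 hn2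

-- ---- the inner 26-way scan: skip-all and first-success shapes ----

theorem canFill_tie (p u : List Char) (cnt' : List Int) (d : Nat) :
    canFill p cnt' d (p ++ u) = pyGt (Char.ofNat (97 + d) :: descFill cnt') u :=
  pyGt_append p _ u

theorem innerScan_skip_all (tl : List Char) (L : List Nat) (cnt : List Int) (res : List Char)
    (h : ∀ d ∈ L, cnt.getD d 0 = 0 ∨ canFill res (decAt cnt d) d tl = false) :
    innerScan tl L (cnt, res) = (cnt, res) := by
  induction L with
  | nil => rfl
  | cons d ds ih =>
    have hd := h d (by simp)
    have tail := ih (fun e he => h e (List.mem_cons_of_mem _ he))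
    show (if cnt.getD d 0 = 0 then innerScan tl ds (cnt, res)
      else if canFill res (decAt cnt d) d tl then (decAt cnt d, res ++ [Char.ofNat (97 + d)])
      else innerScan tl ds (cnt, res)) = (cnt, res)
    by_cases h0 : cnt.getD d 0 = 0
    · rw [if_pos h0]; exact tail
    · have hcf : canFill res (decAt cnt d) d tl = false := by
        rcases hd with h' | h'
        · exact absurd h' h0
        · exact h'
      rw [if_neg h0, if_neg (by simp [hcf])]
      exact tail

theorem innerScan_first (tl : List Char) (L1 L2 : List Nat) (d : Nat)
    (cnt : List Int) (res : List Char)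
    (h1 : ∀ e ∈ L1, cnt.getD e 0 = 0 ∨ canFill res (decAt cnt e) e tl = false)
    (hd0 : ¬ cnt.getD d 0 = 0) (hcf : canFill res (decAt cnt d) d tl = true) :
    innerScan tl (L1 ++ d :: L2) (cnt, res) = (decAt cnt d, res ++ [Char.ofNat (97 + d)]) := by
  induction L1 with
  | nil =>
    show (if cnt.getD d 0 = 0 then innerScan tl L2 (cnt, res)
      else if canFill res (decAt cnt d) d tl then (decAt cnt d, res ++ [Char.ofNat (97 + d)])
      else innerScan tl L2 (cnt, res)) = (decAt cnt d, res ++ [Char.ofNat (97 + d)])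
    rw [if_neg hd0, if_pos (by simp [hcf])]
  | cons e es ih =>
    have he := h1 e (by simp)
    have tail := ih (fun x hx => h1 x (List.mem_cons_of_mem _ hx))
    show (if cnt.getD e 0 = 0 then innerScan tl (es ++ d :: L2) (cnt, res)
      else if canFill res (decAt cnt e) e tl then (decAt cnt e, res ++ [Char.ofNat (97 + e)])
      else innerScan tl (es ++ d :: L2) (cnt, res)) = (decAt cnt d, res ++ [Char.ofNat (97 + d)])
    by_cases h0 : cnt.getD e 0 = 0
    · rw [if_pos h0]; exact tail
    · have hcf' : canFill res (decAt cnt e) e tl = false := by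
        rcases he with h' | h'
        · exact absurd h' h0
        · exact h'
      rw [if_neg h0, if_neg (by simp [hcf'])]
      exact tail

theorem aLoop_noop (tl : List Char) (st : List Int × List Char)
    (h : innerScan tl (List.range 26) st = st) : ∀ k, aLoop tl k st = st := by
  intro k
  induction k with
  | zero => rfl
  | succ k ih => rw [aLoop, h]; exact ih


-- ---- splitting range 26 at an index ----

theorem range26_split (vi : Nat) (h : vi < 26) :
    List.range 26 = List.range' 0 vi ++ vi :: List.range' (vi + 1) (25 - vi) := by
  rw [List.range_eq_range']
  have h1 : List.range' 0 vi 1 ++ List.range' (0 + 1 * vi) (26 - vi) 1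
      = List.range' 0 (vi + (26 - vi)) 1 := List.range'_append
  have h2 : vi + (26 - vi) = 26 := by omega
  have h3 : 26 - vi = (25 - vi) + 1 := by omega
  rw [h2] at h1
  rw [← h1, h3, List.range'_succ]
  simp

theorem mem_range'_lt {e vi : Nat} (h : e ∈ List.range' 0 vi) : e < vi := by
  rw [List.mem_range'] at h; omega

-- ---- the free phase of A: the smallest available letter is always placed ----

theorem freeLemma (tl : List Char) :
    ∀ (k : Nat) (cnt : List Int) (p : List Char), Valid cnt → totalCnt cnt = k → FreeSt p tl →
      (aLoop tl k (cnt, p)).2 = p ++ ascFill cnt := by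
  intro k
  induction k with
  | zero =>
    intro cnt p hv ht hf
    simp [aLoop, ascFill_nil cnt ht]
  | succ k ih =>
    intro cnt p hv ht hf
    have hfind : ((List.range 26).find? (fun d => decide (0 < cnt.getD d 0))).isSome = true := by
      apply List.find?_isSome.mpr
      obtain ⟨d, hd⟩ := totalCnt_pos_exists cnt (by omega)
      have hlt : d < cnt.length := lt_length_of_getD_pos cnt d hd
      refine ⟨d, ?_, by simpa using hd⟩
      rw [List.mem_range]
      have h26 := hv.1
      omega
    obtain ⟨c, hc⟩ := Option.isSome_iff_exists.mp hfind
    obtain ⟨hpc, L1, L2, hL, hfail⟩ := List.find?_eq_some_iff_append.mp hc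
    have hcpos : 0 < cnt.getD c 0 := by simpa using hpc
    have h1 : ∀ d ∈ L1, cnt.getD d 0 ≤ 0 := by
      intro d hd
      have := hfail d hd
      simp at this
      exact this
    have h1' : ∀ e ∈ L1, cnt.getD e 0 = 0 ∨ canFill p (decAt cnt e) e tl = false := by
      intro e he
      left
      have := getD_nonneg cnt hv e
      have := h1 e he
      omega
    have hcf : canFill p (decAt cnt c) c tl = true := by
      unfold canFill
      exact hf (Char.ofNat (97 + c) :: descFill (decAt cnt c)) (by simp)
    rw [aLoop, hL, innerScan_first tl L1 L2 c cnt p h1' (by omega) hcf]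
    rw [ih (decAt cnt c) (p ++ [Char.ofNat (97 + c)]) (valid_decAt cnt c hv hcpos)
      (by have := totalCnt_decAt cnt c hcpos; omega) (freeSt_extend p tl _ hf)]
    rw [ascFill_head cnt L1 L2 c hL h1 hcpos]
    simp

-- ---- the invariant step: a tied state always has a successor ----

theorem step_cases (cnt : List Int) (v : Char) (u' : List Char) (hv : Valid cnt)
    (hinv : pyGt (descFill cnt) (v :: u') = true) :
    ((decide (97 ≤ v.toNat) && decide (v.toNat ≤ 122)
        && decide (0 < cnt.getD (v.toNat - 97) 0))
      && pyGt (descFill (decAt cnt (v.toNat - 97))) u') = true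
    ∨ (∃ j, findGreater cnt v = some j) := by
  have htpos : 0 < totalCnt cnt := by
    by_contra hz
    have hz0 : totalCnt cnt = 0 := by omega
    rw [descFill_nil cnt hz0, pyGt_nil] at hinv
    exact Bool.false_ne_true hinv
  have hfind : (((List.range 26).reverse).find? (fun d => decide (0 < cnt.getD d 0))).isSome = true := by
    apply List.find?_isSome.mpr
    obtain ⟨d, hd⟩ := totalCnt_pos_exists cnt htpos
    have hlt : d < cnt.length := lt_length_of_getD_pos cnt d hd
    refine ⟨d, ?_, by simpa using hd⟩
    rw [List.mem_reverse, List.mem_range]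
    have h26 := hv.1
    omega
  obtain ⟨M, hM⟩ := Option.isSome_iff_exists.mp hfind
  obtain ⟨hpM, L1, L2, hL, hfailM⟩ := List.find?_eq_some_iff_append.mp hM
  have hMpos : 0 < cnt.getD M 0 := by simpa using hpM
  have hM26 : M < 26 := by
    have : M ∈ (List.range 26).reverse := by rw [hL]; simp
    rw [List.mem_reverse, List.mem_range] at this
    exact this
  have h1 : ∀ d ∈ L1, cnt.getD d 0 ≤ 0 := by
    intro d hd
    have := hfailM d hd
    simp at this
    exact this
  have hdesc := descFill_head cnt L1 L2 M hL h1 hMpos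
  rw [hdesc, pyGt_cons] at hinv
  by_cases hvM : v = Char.ofNat (97 + M)
  · left
    have hvN : v.toNat = 97 + M := by rw [hvM, toNat_ofNat_small _ (by omega)]
    rw [if_pos hvM] at hinv
    have hvi : v.toNat - 97 = M := by omega
    rw [hvi]
    simp only [Bool.and_eq_true, decide_eq_true_eq]
    exact ⟨⟨⟨by omega, by omega⟩, hMpos⟩, hinv⟩
  · right
    rw [if_neg hvM] at hinv
    have hvlt : v < Char.ofNat (97 + M) := of_decide_eq_true hinv
    have hfg : (findGreater cnt v).isSome = true := by
      apply List.find?_isSome.mpr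
      refine ⟨M, by rw [List.mem_range]; exact hM26, ?_⟩
      simp only [Bool.and_eq_true, decide_eq_true_eq]
      exact ⟨hMpos, hvlt⟩
    exact Option.isSome_iff_exists.mp hfg

-- ---- B never dead-ends while the invariant holds ----

theorem bLoop_some : ∀ (u : List Char) (n : Nat) (cnt : List Int), Valid cnt →
    totalCnt cnt = n → pyGt (descFill cnt) u = true → ∃ r, bLoop n cnt u = some r := by
  intro u
  induction u with
  | nil =>
    intro n cnt _ _ _
    cases n with
    | zero => exact ⟨_, rfl⟩
    | succ n => exact ⟨_, rfl⟩
  | cons v u' ih =>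
    intro n cnt hv ht hinv
    have htpos : 0 < totalCnt cnt := by
      by_contra hz
      have hz0 : totalCnt cnt = 0 := by omega
      rw [descFill_nil cnt hz0, pyGt_nil] at hinv
      exact Bool.false_ne_true hinv
    cases n with
    | zero => omega
    | succ n =>
      by_cases hC : ((decide (97 ≤ v.toNat) && decide (v.toNat ≤ 122)
          && decide (0 < cnt.getD (v.toNat - 97) 0))
        && pyGt (descFill (decAt cnt (v.toNat - 97))) u') = true
      · have hC' := hC
        simp only [Bool.and_eq_true, decide_eq_true_eq] at hC'
        obtain ⟨⟨⟨_, _⟩, hav⟩, htest⟩ := hC'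
        obtain ⟨r, hr⟩ := ih n (decAt cnt (v.toNat - 97))
          (valid_decAt cnt _ hv hav)
          (by have := totalCnt_decAt cnt _ hav; omega) htest
        refine ⟨v :: r, ?_⟩
        simp only [bLoop]
        rw [if_pos hC, hr]
        rfl
      · rcases step_cases cnt v u' hv hinv with hC2 | ⟨j, hj⟩
        · exact absurd hC2 hC
        · refine ⟨Char.ofNat (97 + j) :: ascFill (decAt cnt j), ?_⟩
          simp only [bLoop]
          rw [if_neg hC, hj]

-- ---- the main simulation: A's greedy loop against B's walk along target ----

theorem tieLemma : ∀ (u : List Char) (n : Nat) (cnt : List Int) (p : List Char),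
    Valid cnt → totalCnt cnt = n →
    (pyGt (descFill cnt) u = true ∨ p = []) →
    (aLoop (p ++ u) n (cnt, p)).2
      = (match bLoop n cnt u with | some r => p ++ r | none => p) := by
  intro u
  induction u with
  | nil =>
    intro n cnt p hv ht _
    have hfree : FreeSt p (p ++ ([] : List Char)) := by
      simpa using freeSt_self p
    have hres := freeLemma (p ++ ([] : List Char)) n cnt p hv ht hfree
    cases n with
    | zero => simpa [bLoop] using hres
    | succ n => simpa [bLoop] using hres
  | cons v u' ih =>
    intro n cnt p hv ht hinv
    cases n with
    | zero =>
      simp [aLoop, bLoop, ascFill_nil cnt ht]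
    | succ n =>
      by_cases hC : ((decide (97 ≤ v.toNat) && decide (v.toNat ≤ 122)
          && decide (0 < cnt.getD (v.toNat - 97) 0))
        && pyGt (descFill (decAt cnt (v.toNat - 97))) u') = true
      · -- tie step: A places target's own letter, B walks on
        have hC' := hC
        simp only [Bool.and_eq_true, decide_eq_true_eq] at hC'
        obtain ⟨⟨⟨hge, hle⟩, hav⟩, htest⟩ := hC'
        set vi := v.toNat - 97 with hvidef
        have hvi26 : vi < 26 := by omega
        have hvchar : Char.ofNat (97 + vi) = v :=
          charEq_of_toNat _ _ (by rw [toNat_ofNat_small _ (by omega)]; omega)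
        have hL := range26_split vi hvi26
        have hfail : ∀ e ∈ List.range' 0 vi, cnt.getD e 0 = 0
            ∨ canFill p (decAt cnt e) e (p ++ v :: u') = false := by
          intro e he
          have helt : e < vi := mem_range'_lt he
          by_cases h0 : cnt.getD e 0 = 0
          · exact Or.inl h0
          · right
            rw [canFill_tie, pyGt_cons]
            have hne : ¬ v = Char.ofNat (97 + e) := by
              intro hh
              have := congrArg Char.toNat hh
              rw [toNat_ofNat_small _ (by omega)] at this
              omega
            rw [if_neg hne]
            simp only [decide_eq_false_iff_not, charLt_iff, toNat_ofNat_small _ (by omega : 97 + e < 55296)]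
            omega
        have hsucc : canFill p (decAt cnt vi) vi (p ++ v :: u') = true := by
          rw [canFill_tie, pyGt_cons, if_pos hvchar.symm]
          exact htest
        rw [aLoop, hL, innerScan_first _ _ _ _ _ _ hfail (by omega) hsucc, hvchar]
        have hpv : p ++ v :: u' = (p ++ [v]) ++ u' := by simp
        rw [hpv]
        rw [ih n (decAt cnt vi) (p ++ [v]) (valid_decAt cnt vi hv hav)
          (by have := totalCnt_decAt cnt vi hav; omega) (Or.inl htest)]
        have hbeq : bLoop (n + 1) cnt (v :: u')
            = (bLoop n (decAt cnt vi) u').map (fun r => v :: r) := by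
          simp only [bLoop]
          rw [if_pos hC]
        rw [hbeq]
        obtain ⟨r, hr⟩ := bLoop_some u' n (decAt cnt vi) (valid_decAt cnt vi hv hav)
          (by have := totalCnt_decAt cnt vi hav; omega) htest
        rw [hr]
        simp
      · -- the tie breaks here
        cases hfg : findGreater cnt v with
        | some j =>
          obtain ⟨hpj, L1, L2, hL, hfailj⟩ := List.find?_eq_some_iff_append.mp hfg
          simp only [Bool.and_eq_true, decide_eq_true_eq] at hpj
          obtain ⟨hjpos, hjlt⟩ := hpj
          have hj26 : j < 26 := by
            have : j ∈ List.range 26 := by rw [hL]; simp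
            rw [List.mem_range] at this
            exact this
          have hjN : (Char.ofNat (97 + j)).toNat = 97 + j := toNat_ofNat_small _ (by omega)
          have hfail : ∀ e ∈ L1, cnt.getD e 0 = 0
              ∨ canFill p (decAt cnt e) e (p ++ v :: u') = false := by
            intro e he
            have hnp := hfailj e he
            simp only [Bool.not_and, Bool.or_eq_true, Bool.not_eq_true',
              decide_eq_false_iff_not] at hnp
            by_cases h0 : cnt.getD e 0 = 0
            · exact Or.inl h0
            · right
              have hepos : 0 < cnt.getD e 0 := by
                have := getD_nonneg cnt hv e
                omega
              have hnlt : ¬ v < Char.ofNat (97 + e) := by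
                rcases hnp with h' | h'
                · exact absurd hepos (by simpa using h')
                · simpa using h'
              have he26 : e < 26 := by
                have : e ∈ List.range 26 := by rw [hL]; simp [he]
                rw [List.mem_range] at this
                exact this
              rw [canFill_tie, pyGt_cons]
              by_cases hve : v = Char.ofNat (97 + e)
              · -- e is exactly target's letter; the tie test failed, so can_fill fails
                rw [if_pos hve]
                have hvN : v.toNat = 97 + e := by rw [hve, toNat_ofNat_small _ (by omega)]
                have hevi : e = v.toNat - 97 := by omega
                cases htest : pyGt (descFill (decAt cnt (v.toNat - 97))) u' with
                | false => rw [hevi]; exact htest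
                | true =>
                  exact absurd (by
                    simp only [Bool.and_eq_true, decide_eq_true_eq]
                    exact ⟨⟨⟨by omega, by omega⟩, by rw [← hevi]; exact hepos⟩, htest⟩) hC
              · rw [if_neg hve]
                simp only [decide_eq_false_iff_not]
                exact hnlt
          have hsucc : canFill p (decAt cnt j) j (p ++ v :: u') = true := by
            rw [canFill_tie, pyGt_cons]
            have hne : ¬ v = Char.ofNat (97 + j) := by
              intro hh
              rw [hh] at hjlt
              exact lt_irrefl _ hjlt
            rw [if_neg hne]
            simpa using hjlt
          rw [aLoop, hL, innerScan_first _ _ _ _ _ _ hfail (by omega) hsucc]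
          have hfree : FreeSt (p ++ [Char.ofNat (97 + j)]) (p ++ v :: u') := by
            intro x hx
            have : (p ++ [Char.ofNat (97 + j)]) ++ x = p ++ (Char.ofNat (97 + j) :: x) := by simp
            rw [this, pyGt_append, pyGt_cons, if_neg (by
              intro hh
              rw [hh] at hjlt
              exact lt_irrefl _ hjlt)]
            simpa using hjlt
          rw [freeLemma (p ++ v :: u') n (decAt cnt j) _ (valid_decAt cnt j hv hjpos)
            (by have := totalCnt_decAt cnt j hjpos; omega) hfree]
          have hbeq : bLoop (n + 1) cnt (v :: u')
              = some (Char.ofNat (97 + j) :: ascFill (decAt cnt j)) := by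
            simp only [bLoop]
            rw [if_neg hC, hfg]
          rw [hbeq]
          simp
        | none =>
          -- dead end: only possible in the initial state, where A also returns []
          have hp : p = [] := by
            rcases hinv with hgt | hp
            · rcases step_cases cnt v u' hv hgt with hC2 | ⟨j, hj⟩
              · exact absurd hC2 hC
              · rw [hj] at hfg; cases hfg
            · exact hp
          subst hp
          have hnone := List.find?_eq_none.mp hfg
          have hallfail : ∀ d ∈ List.range 26, cnt.getD d 0 = 0
              ∨ canFill [] (decAt cnt d) d ([] ++ v :: u') = false := by
            intro d hd
            have hnp := hnone d hd
            simp only [Bool.and_eq_true, decide_eq_true_eq, not_and, not_lt] at hnp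
            by_cases h0 : cnt.getD d 0 = 0
            · exact Or.inl h0
            · right
              have hdpos : 0 < cnt.getD d 0 := by
                have := getD_nonneg cnt hv d
                omega
              have hnlt : ¬ v < Char.ofNat (97 + d) := by
                intro hlt
                exact absurd hlt (by simpa using hnp hdpos)
              have hd26 : d < 26 := by rwa [List.mem_range] at hd
              rw [canFill_tie, pyGt_cons]
              by_cases hvd : v = Char.ofNat (97 + d)
              · rw [if_pos hvd]
                have hvN : v.toNat = 97 + d := by rw [hvd, toNat_ofNat_small _ (by omega)]
                have hdvi : d = v.toNat - 97 := by omega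
                cases htest : pyGt (descFill (decAt cnt (v.toNat - 97))) u' with
                | false => rw [hdvi]; exact htest
                | true =>
                  exact absurd (by
                    simp only [Bool.and_eq_true, decide_eq_true_eq]
                    exact ⟨⟨⟨by omega, by omega⟩, by rw [← hdvi]; exact hdpos⟩, htest⟩) hC
              · rw [if_neg hvd]
                simp only [decide_eq_false_iff_not]
                exact hnlt
          have hskip := innerScan_skip_all ([] ++ v :: u') (List.range 26) cnt [] hallfail
          have hnoop := aLoop_noop ([] ++ v :: u') (cnt, []) hskip (n + 1)
          rw [hnoop]
          have hbeq : bLoop (n + 1) cnt (v :: u') = none := by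
            simp only [bLoop]
            rw [if_neg hC, hfg]
          rw [hbeq]

-- ===== VERDICT (by name: the statement is the Claim_ definition above) =====
theorem lexGreaterPermutation_spec : Claim_equal_lexGreaterPermutation := by
  intro s target _ hpre
  show lexGreaterPermutation s target = lexGreaterPermutation_alt s target
  unfold lexGreaterPermutation lexGreaterPermutation_alt
  by_cases hg : pyLe (PySem.List.sorted s.toList (fun x => x) true) target.toList = true
  · simp only [hg, if_true]
  · simp only [hg, if_false]
    have hpre' : ∀ c ∈ s.toList, 71 ≤ c.toNat ∧ c.toNat ≤ 122 := by
      intro c hc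
      rcases hpre with hp | hp
      · have := List.all_eq_true.mp hp c hc
        simpa using this
      · exact absurd hp hg
    have hvv := countChar_valid s.toList hpre'
    have htt := countChar_total s.toList hpre'
    have hsim := tieLemma target.toList s.toList.length (countChar s.toList) [] hvv htt
      (Or.inr rfl)
    rw [show ([] : List Char) ++ target.toList = target.toList from rfl] at hsim
    cases hb : bLoop s.toList.length (countChar s.toList) target.toList with
    | some r =>
      rw [hb] at hsim
      simp only [List.nil_append] at hsim
      exact congrArg String.ofList hsim
    | none =>
      rw [hb] at hsim
      rw [hsim]
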